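-- pv_equiv track=rewrite | github.com/9tpie/interconnect | unit_test_interconnect.py | parent_child_pairs_by_level
-- ===== SOURCE A (Python) =====
-- import math
-- from collections import defaultdict
--
-- def parent_child_pairs_by_level(num_nodes: int):
--     """
--     回傳格式：
--     level 1 2: (1,2) (1,3)
--     level 2 3: (2,4) (2,5) (3,6) (3,7)
--     """
--     levels = defaultdict(list)
--
--     for parent in range(1, num_nodes + 1):
--         parent_level = int(math.floor(math.log2(parent))) + 1
--
--         left = 2 * parent
--         right = 2 * parent + 1
--
--         if left <= num_nodes:
--             levels[parent_level].append((parent, left))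
--         if right <= num_nodes:
--             levels[parent_level].append((parent, right))
--
--     return levels
-- ===== SOURCE B (Python) =====
-- from collections import defaultdict
--
-- def parent_child_pairs_by_level(num_nodes: int):
--     # Level-by-level: level k+1 holds parents in [2**k, min(2**(k+1)-1, num_nodes)].
--     # No log2 needed; the outer loop walks powers of two.
--     levels = defaultdict(list)
--     k = 0
--     while 2 ** k <= num_nodes:
--         start = 2 ** k
--         end = min(2 * start - 1, num_nodes)
--         pairs = []
--         for parent in range(start, end + 1):
--             if 2 * parent <= num_nodes:
--                 pairs.append((parent, 2 * parent))
--             if 2 * parent + 1 <= num_nodes: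
--                 pairs.append((parent, 2 * parent + 1))
--         if pairs:
--             levels[k + 1] = pairs
--         k += 1
--     return levels
-- ===== Notes on version B (the rewrite author's own statement) =====
-- stated objective: alternative
-- what changed: B iterates level by level over power-of-two blocks of parents, collecting each level's pair list in one inner loop and inserting it once, instead of A's flat per-node loop that computes each parent's level with floating-point math.log2 and appends pairs one at a time.
import Mathlib
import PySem

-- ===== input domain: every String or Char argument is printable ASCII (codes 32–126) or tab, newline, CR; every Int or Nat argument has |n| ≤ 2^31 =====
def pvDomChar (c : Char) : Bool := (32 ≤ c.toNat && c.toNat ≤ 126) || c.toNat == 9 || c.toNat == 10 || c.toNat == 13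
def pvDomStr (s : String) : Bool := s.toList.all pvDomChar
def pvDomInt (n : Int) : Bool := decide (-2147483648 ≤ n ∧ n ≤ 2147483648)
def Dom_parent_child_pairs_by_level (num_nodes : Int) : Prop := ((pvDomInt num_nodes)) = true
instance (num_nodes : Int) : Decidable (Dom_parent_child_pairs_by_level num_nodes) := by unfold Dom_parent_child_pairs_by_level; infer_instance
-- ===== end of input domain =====

-- B builds the heap's parent/child pairs level by level over power-of-two blocks (no log2),
-- instead of A's per-node loop that computes each parent's level with math.log2; alternative decomposition.

-- ===== PORT A =====
-- int(math.floor(math.log2(parent))) for parent ≥ 1: exact as Nat.log 2 on the domain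
-- |num_nodes| ≤ 2^31 (CPython's float log2 yields the exact floor for 1 ≤ p ≤ 2^31).
def pvStepA (n : Int) (d : PySem.Dict Int (List (Int × Int))) (parent : Int) :
    PySem.Dict Int (List (Int × Int)) :=
  let parent_level : Int := (Nat.log 2 parent.toNat : Int) + 1
  let left := 2 * parent
  let right := 2 * parent + 1
  let d := if left ≤ n then d.modify parent_level [] (· ++ [(parent, left)]) else d
  if right ≤ n then d.modify parent_level [] (· ++ [(parent, right)]) else d

def parent_child_pairs_by_level (num_nodes : Int) : List (Int × List (Int × Int)) :=
  ((PySem.List.pyRange 1 (num_nodes + 1) 1).foldl (pvStepA num_nodes) PySem.Dict.empty).items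

-- ===== PORT B =====
-- the inner for-loop of Source B building the per-level pair list
def pvLevelPairs (n start e : Int) : List (Int × Int) :=
  (PySem.List.pyRange start (e + 1) 1).foldl
    (fun ps parent =>
      let ps := if 2 * parent ≤ n then ps ++ [(parent, 2 * parent)] else ps
      if 2 * parent + 1 ≤ n then ps ++ [(parent, 2 * parent + 1)] else ps) []

-- the while-loop of Source B; terminates because 2^k strictly grows past num_nodes
def pvAltLoop (n : Int) (k : Nat) (d : PySem.Dict Int (List (Int × Int))) :
    PySem.Dict Int (List (Int × Int)) :=
  if h : (2 : Int) ^ k ≤ n then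
    let start : Int := 2 ^ k
    let e : Int := min (2 * start - 1) n
    let pairs := pvLevelPairs n start e
    let d' := if pairs = [] then d else d.insert ((k : Int) + 1) pairs
    pvAltLoop n (k + 1) d'
  else d
termination_by (n + 1 - 2 ^ k).toNat
decreasing_by
  have h1 : (0 : Int) < 2 ^ k := by positivity
  have h2 : (2 : Int) ^ (k + 1) = 2 * 2 ^ k := by ring
  omega

def parent_child_pairs_by_level_alt (num_nodes : Int) : List (Int × List (Int × Int)) :=
  (pvAltLoop num_nodes 0 PySem.Dict.empty).items

-- ===== PRECONDITION & SPEC =====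
def Spec_parent_child_pairs_by_level (num_nodes : Int) (out : List (Int × List (Int × Int))) : Prop := out = parent_child_pairs_by_level_alt num_nodes
instance (num_nodes : Int) (out : List (Int × List (Int × Int))) : Decidable (Spec_parent_child_pairs_by_level num_nodes out) := by unfold Spec_parent_child_pairs_by_level; infer_instance

-- ===== CLAIM (what is proved, stated in full; the proofs are below) =====
def Claim_equal_parent_child_pairs_by_level : Prop := ∀ (num_nodes : Int), Dom_parent_child_pairs_by_level num_nodes → Spec_parent_child_pairs_by_level num_nodes (parent_child_pairs_by_level num_nodes)

-- ===== LEMMAS AND PROOFS =====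

-- the pairs a single parent contributes
def pvPairsOf (n p : Int) : List (Int × Int) :=
  (if 2 * p ≤ n then [(p, 2 * p)] else []) ++ (if 2 * p + 1 ≤ n then [(p, 2 * p + 1)] else [])

-- B's inner foldl accumulates exactly the flattened per-parent pairs
lemma pvLevelPairs_eq (n start e : Int) :
    pvLevelPairs n start e = (PySem.List.pyRange start (e + 1) 1).flatMap (pvPairsOf n) := by
  unfold pvLevelPairs
  generalize PySem.List.pyRange start (e + 1) 1 = L
  suffices h : ∀ (L : List Int) (acc : List (Int × Int)),
      L.foldl (fun ps parent =>
        let ps := if 2 * parent ≤ n then ps ++ [(parent, 2 * parent)] else ps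
        if 2 * parent + 1 ≤ n then ps ++ [(parent, 2 * parent + 1)] else ps) acc
        = acc ++ L.flatMap (pvPairsOf n) by
    simpa using h L []
  intro L
  induction L with
  | nil => simp
  | cons p L ih =>
    intro acc
    simp only [List.foldl_cons, List.flatMap_cons, ih, pvPairsOf]
    split_ifs <;> simp

-- A's step for one parent is a fold of single-pair appends at its level key
lemma pvStepA_eq_foldl (n p : Int) (d : PySem.Dict Int (List (Int × Int))) :
    pvStepA n d p
      = (pvPairsOf n p).foldl
          (fun d q => d.modify ((Nat.log 2 p.toNat : Int) + 1) [] (· ++ [q])) d := by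
  unfold pvStepA pvPairsOf
  by_cases h2 : 2 * p + 1 ≤ n
  · have h1 : 2 * p ≤ n := by omega
    simp [h1, h2]
  · by_cases h1 : 2 * p ≤ n <;> simp [h1, h2]

-- folding single-pair appends at one key = one defaultdict-style append of the whole list
lemma pvFoldl_modify_single (key : Int) (qs : List (Int × Int))
    (d : PySem.Dict Int (List (Int × Int))) (hne : qs ≠ []) :
    qs.foldl (fun d q => d.modify key [] (· ++ [q])) d
      = d.insert key (d.getD key [] ++ qs) := by
  induction qs generalizing d with
  | nil => exact absurd rfl hne
  | cons q qs ih =>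
    by_cases hq : qs = []
    · subst hq
      simp [PySem.Dict.modify]
    · simp only [List.foldl_cons, ih _ hq]
      have hmod : d.modify key [] (· ++ [q]) = d.insert key (d.getD key [] ++ [q]) := rfl
      rw [hmod, PySem.Dict.getD_insert_self, PySem.Dict.insert_insert_self]
      simp

-- A's fold over one level block (all parents at level k+1, fresh key) = one insert of the block's pairs
lemma pvBlock_eq (n : Int) (k : Nat) (L : List Int)
    (d : PySem.Dict Int (List (Int × Int)))
    (hlvl : ∀ p ∈ L, (Nat.log 2 p.toNat : Int) = (k : Int))
    (hfresh : ((k : Int) + 1) ∉ d.keys) :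
    L.foldl (pvStepA n) d
      = (if L.flatMap (pvPairsOf n) = [] then d
         else d.insert ((k : Int) + 1) (L.flatMap (pvPairsOf n))) := by
  have hstep : L.foldl (pvStepA n) d
      = L.foldl (fun d p => (pvPairsOf n p).foldl
          (fun d q => d.modify ((k : Int) + 1) [] (· ++ [q])) d) d := by
    apply PySem.List.foldl_congr_mem
    intro d' p hp
    rw [pvStepA_eq_foldl, hlvl p hp]
  rw [hstep, ← List.foldl_flatMap]
  by_cases hflat : L.flatMap (pvPairsOf n) = []
  · simp [hflat]
  · rw [pvFoldl_modify_single _ _ _ hflat, if_neg hflat]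
    have hc : d.contains ((k : Int) + 1) = false := by
      rw [← Bool.not_eq_true, PySem.Dict.contains_iff_mem_keys]
      exact hfresh
    rw [PySem.Dict.getD_of_not_contains d [] hc]
    simp

-- parents in the block [2^k, 2^(k+1)) sit at level k+1
lemma pvLog_of_block (k : Nat) (p : Int) (h1 : (2 : Int) ^ k ≤ p) (h2 : p < 2 ^ (k + 1)) :
    (Nat.log 2 p.toNat : Int) = (k : Int) := by
  have hp2 : (2 : Int) ^ k = ((2 ^ k : Nat) : Int) := by push_cast; ring
  have hp3 : (2 : Int) ^ (k + 1) = ((2 ^ (k + 1) : Nat) : Int) := by push_cast; ring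
  have hpos : (0 : Int) < 2 ^ k := by positivity
  have hlo : 2 ^ k ≤ p.toNat := by omega
  have hhi : p.toNat < 2 ^ (k + 1) := by omega
  rw [Nat.log_eq_of_pow_le_of_lt_pow hlo hhi]

-- main loop correspondence: A's remaining fold from block k equals B's loop from k
lemma pvLoop_eq (n : Int) (k : Nat) (d : PySem.Dict Int (List (Int × Int)))
    (hinv : ∀ key ∈ d.keys, key < (k : Int) + 1) :
    (PySem.List.pyRange (2 ^ k) (n + 1) 1).foldl (pvStepA n) d = pvAltLoop n k d := by
  rw [pvAltLoop]
  split
  case isFalse h =>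
    rw [PySem.List.pyRange_one_eq_nil (by omega)]
    rfl
  case isTrue h =>
    have hpos : (0 : Int) < 2 ^ k := by positivity
    have hp2 : (2 : Int) ^ (k + 1) = 2 * 2 ^ k := by ring
    set m : Int := min (2 * 2 ^ k - 1) n + 1 with hm
    have hsplit : PySem.List.pyRange (2 ^ k) (n + 1) 1
        = PySem.List.pyRange (2 ^ k) m 1 ++ PySem.List.pyRange m (n + 1) 1 :=
      PySem.List.pyRange_one_append _ _ _ (by omega) (by omega)
    have htail : PySem.List.pyRange m (n + 1) 1 = PySem.List.pyRange (2 ^ (k + 1)) (n + 1) 1 := by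
      rcases le_or_gt (2 * 2 ^ k) (n + 1) with hc | hc
      · have : m = 2 ^ (k + 1) := by omega
        rw [this]
      · rw [PySem.List.pyRange_one_eq_nil (by omega), PySem.List.pyRange_one_eq_nil (by omega)]
    rw [hsplit, List.foldl_append, htail]
    have hblock : (PySem.List.pyRange (2 ^ k) m 1).foldl (pvStepA n) d
        = (if pvLevelPairs n (2 ^ k) (min (2 * 2 ^ k - 1) n) = [] then d
           else d.insert ((k : Int) + 1) (pvLevelPairs n (2 ^ k) (min (2 * 2 ^ k - 1) n))) := by
      rw [pvLevelPairs_eq]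
      have : min (2 * 2 ^ k - 1) n + 1 = m := rfl
      rw [this]
      apply pvBlock_eq
      · intro p hp
        rw [PySem.List.mem_pyRange_one] at hp
        exact pvLog_of_block k p hp.1 (by omega)
      · intro hmem
        exact absurd (hinv _ hmem) (by omega)
    rw [hblock]
    apply pvLoop_eq
    intro key hkey
    split at hkey
    · have := hinv key hkey; push_cast; omega
    · rw [PySem.Dict.mem_keys_insert] at hkey
      rcases hkey with h' | h'
      · subst h'; push_cast; omega
      · have := hinv key h'; push_cast; omega
termination_by (n + 1 - 2 ^ k).toNat
decreasing_by
  have h1 : (0 : Int) < 2 ^ k := by positivity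
  have h2 : (2 : Int) ^ (k + 1) = 2 * 2 ^ k := by ring
  omega

-- ===== VERDICT (by name: the statement is the Claim_ definition above) =====
theorem parent_child_pairs_by_level_spec : Claim_equal_parent_child_pairs_by_level := by
  intro n _
  unfold Spec_parent_child_pairs_by_level parent_child_pairs_by_level parent_child_pairs_by_level_alt
  have h := pvLoop_eq n 0 PySem.Dict.empty (by simp)
  norm_num at h
  rw [h]
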